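-- pv_equiv track=rewrite | github.com/FergusCurrie/evolutionary-computation-research | code/learners/EC/dtparse.py | patch_branch
-- ===== SOURCE A (Python) =====
-- def patch_branch(b):
--     """
--     So branches have constistent size
--     """
--     patched = []
--     depth = ""
--     is_passed_depth = False
--     for x in b.split():
--         if '|' in x:
--             depth += x
--         else:
--             if not is_passed_depth:
--                 patched.append(depth)
--             is_passed_depth = True
--             patched.append(x)
--     if 'feature' in b:
--         assert(len(patched) == 4)
--     if 'class' in b:
--         assert(len(patched) == 3)
--     j = ' '.join(patched)
--     return j
-- ===== SOURCE B (Python) =====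
-- def patch_branch(b):
--     """
--     So branches have consistent size
--     """
--     tokens = b.split()
--     depth = ""
--     for t in tokens:
--         if '|' not in t:
--             break
--         depth += t
--     rest = [t for t in tokens if '|' not in t]
--     if 'feature' in b:
--         assert len(rest) == 3
--     if 'class' in b:
--         assert len(rest) == 2
--     return ' '.join([depth] + rest) if rest else ''
-- ===== Notes on version B (the rewrite author's own statement) =====
-- stated objective: simpler
-- what changed: Replaces A's single stateful loop (patched list, growing depth string, is_passed_depth flag) by a two-phase decomposition: concatenate the leading run of '|' marker tokens, filter out all marker tokens for the content, and join [depth]+rest (or return '' when there is no content).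
import Mathlib
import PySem

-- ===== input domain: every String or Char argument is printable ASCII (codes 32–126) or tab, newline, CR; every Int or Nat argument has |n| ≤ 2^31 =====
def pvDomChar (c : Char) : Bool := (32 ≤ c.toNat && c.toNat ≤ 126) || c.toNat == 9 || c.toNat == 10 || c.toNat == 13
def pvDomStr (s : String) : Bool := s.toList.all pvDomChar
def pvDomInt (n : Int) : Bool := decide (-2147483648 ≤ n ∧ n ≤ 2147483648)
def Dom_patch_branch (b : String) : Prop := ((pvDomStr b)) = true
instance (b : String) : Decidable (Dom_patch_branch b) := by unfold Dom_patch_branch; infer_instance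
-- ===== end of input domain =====

-- B replaces A's single stateful loop by a two-phase decomposition (leading-marker concat + filter); objective: simpler.

-- ===== PORT A =====
-- one loop step of A: state = (patched, depth, is_passed_depth)
def pvStepA (st : List String × String × Bool) (x : String) : List String × String × Bool :=
  if PySem.Str.isIn "|" x then (st.1, st.2.1 ++ x, st.2.2)
  else ((if st.2.2 then st.1 else st.1 ++ [st.2.1]) ++ [x], st.2.1, true)

-- A's asserts ('feature'/'class' length checks) raise exactly outside Pre_patch_branch; the returned value is ported here
def patch_branch (b : String) : String :=
  let patched := ((PySem.Str.split₀ b).foldl pvStepA ([], "", false)).1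
  PySem.Str.join " " patched

-- ===== PORT B =====
-- Source B's depth loop (break on first non-marker token)
def pvDepth (acc : String) : List String → String
  | [] => acc
  | t :: ts => if PySem.Str.isIn "|" t then pvDepth (acc ++ t) ts else acc

def patch_branch_alt (b : String) : String :=
  let tokens := PySem.Str.split₀ b
  let depth := pvDepth "" tokens
  let rest := tokens.filter (fun t => !(PySem.Str.isIn "|" t))
  if rest.isEmpty then "" else PySem.Str.join " " ([depth] ++ rest)

-- ===== PRECONDITION & SPEC =====
-- Pre_ excludes exactly the inputs on which A's asserts raise AssertionError
-- ('feature' in b with the content-token count ≠ 3, or 'class' in b with it ≠ 2); B raises there too.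
def Pre_patch_branch (b : String) : Prop :=
  (PySem.Str.isIn "feature" b = true →
    ((PySem.Str.split₀ b).filter (fun t => !(PySem.Str.isIn "|" t))).length = 3) ∧
  (PySem.Str.isIn "class" b = true →
    ((PySem.Str.split₀ b).filter (fun t => !(PySem.Str.isIn "|" t))).length = 2)
instance (b : String) : Decidable (Pre_patch_branch b) := by unfold Pre_patch_branch; infer_instance

def pvWitness_patch_branch : String := "|--- feature_1 <= 0.5"

def Spec_patch_branch (b : String) (out : String) : Prop := out = patch_branch_alt b
instance (b : String) (out : String) : Decidable (Spec_patch_branch b out) := by unfold Spec_patch_branch; infer_instance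

-- ===== CLAIM (what is proved, stated in full; the proofs are below) =====
def Claim_equal_patch_branch : Prop := ∀ (b : String), Dom_patch_branch b → Pre_patch_branch b → Spec_patch_branch b (patch_branch b)

-- ===== LEMMAS AND PROOFS =====

-- once is_passed_depth is true, A's loop just appends the non-marker tokens
theorem pvFoldA_passed (l : List String) (p : List String) (d : String) :
    (l.foldl pvStepA (p, d, true)).1 = p ++ l.filter (fun t => !(PySem.Str.isIn "|" t)) := by
  induction l generalizing p d with
  | nil => simp
  | cons t ts ih =>
    by_cases h : PySem.Chars.isIn ['|'] t.toList = true <;>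
      simp [pvStepA, h, ih]

-- before the first non-marker token, A's loop accumulates depth; its result is B's shape
theorem pvFoldA_notpassed (l : List String) (p : List String) (d : String) :
    (l.foldl pvStepA (p, d, false)).1 =
      if l.filter (fun t => !(PySem.Str.isIn "|" t)) = [] then p
      else p ++ [pvDepth d l] ++ l.filter (fun t => !(PySem.Str.isIn "|" t)) := by
  induction l generalizing p d with
  | nil => simp
  | cons t ts ih =>
    by_cases h : PySem.Chars.isIn ['|'] t.toList = true
    · have hf : (t :: ts).filter (fun t => !(PySem.Str.isIn "|" t))
          = ts.filter (fun t => !(PySem.Str.isIn "|" t)) := by simp [h]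
      rw [List.foldl_cons,
        show pvStepA (p, d, false) t = (p, d ++ t, false) from by simp [pvStepA, h],
        ih, hf, show pvDepth d (t :: ts) = pvDepth (d ++ t) ts from by simp [pvDepth, h]]
    · have hf : (t :: ts).filter (fun t => !(PySem.Str.isIn "|" t))
          = t :: ts.filter (fun t => !(PySem.Str.isIn "|" t)) := by simp [h]
      rw [List.foldl_cons,
        show pvStepA (p, d, false) t = ((p ++ [d]) ++ [t], d, true) from by simp [pvStepA, h],
        pvFoldA_passed, hf, if_neg (by simp),
        show pvDepth d (t :: ts) = d from by simp [pvDepth, h]]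
      simp

-- ===== VERDICT (by name: the statement is the Claim_ definition above) =====
theorem patch_branch_spec : Claim_equal_patch_branch := by
  intro b _ _
  show patch_branch b = patch_branch_alt b
  unfold patch_branch patch_branch_alt
  rw [pvFoldA_notpassed]
  dsimp only
  by_cases h : (PySem.Str.split₀ b).filter (fun t => !(PySem.Str.isIn "|" t)) = []
  · rw [if_pos h, h]
    rfl
  · have he : ((PySem.Str.split₀ b).filter (fun t => !(PySem.Str.isIn "|" t))).isEmpty = false := by
      cases hx : (PySem.Str.split₀ b).filter (fun t => !(PySem.Str.isIn "|" t)) with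
      | nil => exact absurd hx h
      | cons a l => rfl
    rw [if_neg h, he, if_neg (by simp)]
    simp
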